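-- pv_equiv track=rewrite | github.com/BarFish/hackit-hackathon | server.py | count_cur_letter
-- ===== SOURCE A (Python) =====
-- def count_cur_letter(paddedInPassword, cur_letter):
--     """
--     Counts occurrences of the key letter in the padded password.
--
--     :param paddedInPassword: (str) The padded input password.
--     :param cur_letter: (char) The key letter to count.
--     :return: (int) The index of the differing character if the key letter
--     occurs at least 11 times, otherwise -1.
--     """
--     count = 0
--     diff_index = 0
--     for i in range(len(paddedInPassword)):
--         if paddedInPassword[i] == cur_letter:
--             count += 1
--         else:
--             diff_index = i
--     return diff_index if count >= 11 else -1
-- ===== SOURCE B (Python) =====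
-- def count_cur_letter(paddedInPassword, cur_letter):
--     count = sum(1 for c in paddedInPassword if c == cur_letter)
--     diff_index = 0
--     for i in range(len(paddedInPassword) - 1, -1, -1):
--         if paddedInPassword[i] != cur_letter:
--             diff_index = i
--             break
--     return diff_index if count >= 11 else -1
-- ===== Notes on version B (the rewrite author's own statement) =====
-- stated objective: alternative
-- what changed: Replaces A's single forward pass tracking the last mismatch with a separate count pass plus a reversed early-terminating search for the last differing index.
import Mathlib
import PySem

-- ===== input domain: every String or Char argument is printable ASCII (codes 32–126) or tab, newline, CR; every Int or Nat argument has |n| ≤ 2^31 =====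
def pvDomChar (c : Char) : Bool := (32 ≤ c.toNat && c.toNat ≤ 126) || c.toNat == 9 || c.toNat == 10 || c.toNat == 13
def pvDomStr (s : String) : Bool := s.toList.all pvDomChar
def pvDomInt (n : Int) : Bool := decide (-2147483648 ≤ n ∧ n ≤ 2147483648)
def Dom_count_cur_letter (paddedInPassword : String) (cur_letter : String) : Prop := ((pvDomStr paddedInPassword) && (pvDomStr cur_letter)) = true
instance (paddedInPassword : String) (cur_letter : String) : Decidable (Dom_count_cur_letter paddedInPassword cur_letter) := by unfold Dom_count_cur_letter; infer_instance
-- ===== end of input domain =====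

-- B replaces A's forward last-mismatch tracking by a count pass plus a reversed early-break search (objective: alternative decomposition).

-- ===== PORT A =====
-- one forward loop over indices, tracking (count, diff_index)
def count_cur_letter (paddedInPassword : String) (cur_letter : String) : Int :=
  let r := (PySem.List.enumerate paddedInPassword.toList 0).foldl
    (fun (st : Int × Int) (ic : Int × Char) =>
      if String.mk [ic.2] = cur_letter then (st.1 + 1, st.2) else (st.1, ic.1))
    (0, 0)
  if r.1 ≥ 11 then r.2 else -1

-- ===== PORT B =====
-- count = sum(1 for c in s if c == cur_letter)
def pvCountB (cur_letter : String) (l : List Char) : Int :=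
  l.foldl (fun acc c => acc + (if String.mk [c] = cur_letter then 1 else 0)) 0

-- reversed early-terminating search: for i in range(len-1, -1, -1): if s[i] != cur: return i; default 0
def pvLastDiff (cur_letter : String) : List Char → Nat → Int
  | [], _ => 0
  | c :: rest, i => if String.mk [c] = cur_letter then pvLastDiff cur_letter rest (i - 1) else (i : Int)

def count_cur_letter_alt (paddedInPassword : String) (cur_letter : String) : Int :=
  let count := pvCountB cur_letter paddedInPassword.toList
  let diff_index := pvLastDiff cur_letter paddedInPassword.toList.reverse (paddedInPassword.toList.length - 1)
  if count ≥ 11 then diff_index else -1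

-- ===== PRECONDITION & SPEC =====
def Spec_count_cur_letter (paddedInPassword : String) (cur_letter : String) (out : Int) : Prop := out = count_cur_letter_alt paddedInPassword cur_letter
instance (paddedInPassword : String) (cur_letter : String) (out : Int) : Decidable (Spec_count_cur_letter paddedInPassword cur_letter out) := by unfold Spec_count_cur_letter; infer_instance

-- ===== CLAIM (what is proved, stated in full; the proofs are below) =====
def Claim_equal_count_cur_letter : Prop := ∀ (paddedInPassword : String) (cur_letter : String), Dom_count_cur_letter paddedInPassword cur_letter → Spec_count_cur_letter paddedInPassword cur_letter (count_cur_letter paddedInPassword cur_letter)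

-- ===== LEMMAS AND PROOFS =====

-- A's fold computes exactly (B's count, B's reversed-search last mismatch index)
theorem pvFold_eq (cur_letter : String) (l : List Char) :
    (PySem.List.enumerate l 0).foldl
      (fun (st : Int × Int) (ic : Int × Char) =>
        if String.mk [ic.2] = cur_letter then (st.1 + 1, st.2) else (st.1, ic.1))
      (0, 0)
    = (pvCountB cur_letter l, pvLastDiff cur_letter l.reverse (l.length - 1)) := by
  induction l using List.reverseRecOn with
  | nil => simp [PySem.List.enumerate, pvCountB, pvLastDiff]
  | append_singleton xs x ih =>
      rw [PySem.List.enumerate_append, List.foldl_append, ih]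
      simp only [PySem.List.enumerate, List.foldl, pvCountB, List.foldl_append,
        List.reverse_append, List.reverse_cons, List.reverse_nil, List.nil_append,
        List.cons_append, List.length_append, List.length_cons, List.length_nil]
      by_cases h : String.mk [x] = cur_letter
      · simp [h, pvLastDiff]
      · simp [h, pvLastDiff]

-- ===== VERDICT (by name: the statement is the Claim_ definition above) =====
theorem count_cur_letter_spec : Claim_equal_count_cur_letter := by
  intro p cur _
  show _ = _
  unfold count_cur_letter count_cur_letter_alt
  rw [pvFold_eq]
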